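-- pv_equiv track=rewrite | github.com/Pomodoreo/A_AI_CW2 | predict_delay.py | get_station_code
-- ===== SOURCE A (Python) =====
-- def get_station_code(user_station, stations):
--     user_station = user_station.lower().strip()
--
--     if user_station in stations:
--         return stations[user_station]
--
--     for station_name, station_code in stations.items():
--         if user_station in station_name:
--             return station_code
--
--     return None
-- ===== SOURCE B (Python) =====
-- def get_station_code(user_station, stations):
--     target = user_station.lower().strip()
--     found = False
--     code = None
--     for station_name, station_code in stations.items():
--         if station_name == target:
--             return station_code
--         if not found and target in station_name:
--             found = True
--             code = station_code
--     return code if found else None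
-- ===== Notes on version B (the rewrite author's own statement) =====
-- stated objective: alternative
-- what changed: Replaces A's two phases (whole-dict exact-key lookup, then a second substring scan) with one single pass that returns immediately on an exact name match and records the first substring match in a found-flag/code accumulator, returned after the loop.
import Mathlib
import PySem

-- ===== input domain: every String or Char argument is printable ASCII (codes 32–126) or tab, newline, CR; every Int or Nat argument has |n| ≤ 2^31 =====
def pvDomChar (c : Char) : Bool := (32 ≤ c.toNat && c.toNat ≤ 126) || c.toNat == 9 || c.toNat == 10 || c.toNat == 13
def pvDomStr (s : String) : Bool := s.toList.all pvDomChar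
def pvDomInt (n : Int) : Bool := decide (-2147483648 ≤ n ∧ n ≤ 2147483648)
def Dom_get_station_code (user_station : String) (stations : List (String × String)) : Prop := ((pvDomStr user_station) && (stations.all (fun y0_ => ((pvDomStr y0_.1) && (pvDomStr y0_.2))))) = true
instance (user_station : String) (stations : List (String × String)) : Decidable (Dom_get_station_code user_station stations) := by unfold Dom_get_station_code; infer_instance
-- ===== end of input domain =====

-- B replaces A's two phases (exact dict lookup, then a substring scan) with a single pass
-- keeping a found-flag/code accumulator; same result, same asymptotic cost (alternative decomposition).


-- ===== PORT A =====
-- A's second phase: 'for station_name, station_code in stations.items(): if user_station in station_name: return station_code' then 'return None'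
def aScan (target : String) : List (String × String) → Option String
  | [] => none
  | (station_name, station_code) :: rest =>
      if PySem.Str.isIn target station_name then some station_code else aScan target rest

def get_station_code (user_station : String) (stations : List (String × String)) : Option String :=
  let target := PySem.Str.strip (PySem.Str.lower user_station)   -- user_station.lower().strip()
  let d := PySem.Dict.ofList stations                            -- the Python dict argument
  if d.contains target then d.get? target                        -- 'if user_station in stations: return stations[user_station]'
  else aScan target d.items

-- ===== PORT B =====
-- B's single pass: return on exact match; record first substring match in (found, code); after the loop, code if found else None
def bScan (target : String) : List (String × String) → Bool → Option String → Option String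
  | [], found, code => if found then code else none
  | (station_name, station_code) :: rest, found, code =>
      if station_name == target then some station_code
      else if !found && PySem.Str.isIn target station_name then bScan target rest true (some station_code)
      else bScan target rest found code

def get_station_code_alt (user_station : String) (stations : List (String × String)) : Option String :=
  let target := PySem.Str.strip (PySem.Str.lower user_station)
  bScan target (PySem.Dict.ofList stations).items false none

-- ===== PRECONDITION & SPEC =====
def Spec_get_station_code (user_station : String) (stations : List (String × String)) (out : Option String) : Prop := out = get_station_code_alt user_station stations
instance (user_station : String) (stations : List (String × String)) (out : Option String) : Decidable (Spec_get_station_code user_station stations out) := by unfold Spec_get_station_code; infer_instance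

-- ===== CLAIM (what is proved, stated in full; the proofs are below) =====
def Claim_equal_get_station_code : Prop := ∀ (user_station : String) (stations : List (String × String)), Dom_get_station_code user_station stations → Spec_get_station_code user_station stations (get_station_code user_station stations)

-- ===== LEMMAS AND PROOFS =====

-- With the flag set, B's loop only watches for a later exact match; otherwise it yields the recorded code.
theorem bScan_true (t : String) (L : List (String × String)) (code : Option String) :
    bScan t L true code =
      if (PySem.Dict.mk L).contains t then (PySem.Dict.mk L).get? t else code := by
  induction L generalizing code with
  | nil =>
      rw [PySem.Dict.contains_eq_isSome_get?]
      have hnil : (PySem.Dict.mk ([] : List (String × String))).get? t = none := rfl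
      rw [hnil]; simp [bScan]
  | cons p rest ih =>
      obtain ⟨name, c⟩ := p
      rw [PySem.Dict.contains_eq_isSome_get?, PySem.Dict.get?_mk_cons]
      by_cases h : name == t
      · simp [bScan, h]
      · simp only [bScan, h, Bool.false_eq_true, if_false, Bool.not_true, Bool.false_and]
        rw [ih, PySem.Dict.contains_eq_isSome_get?]

-- A's two-phase result equals B's single pass from the initial (false, none) state.
theorem scan_main (t : String) (L : List (String × String)) :
    (if (PySem.Dict.mk L).contains t then (PySem.Dict.mk L).get? t else aScan t L) =
      bScan t L false none := by
  induction L with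
  | nil =>
      rw [PySem.Dict.contains_eq_isSome_get?]
      have hnil : (PySem.Dict.mk ([] : List (String × String))).get? t = none := rfl
      rw [hnil]; simp [bScan, aScan]
  | cons p rest ih =>
      obtain ⟨name, c⟩ := p
      rw [PySem.Dict.contains_eq_isSome_get?, PySem.Dict.get?_mk_cons]
      by_cases h : name == t
      · simp [bScan, h]
      · simp only [bScan, h, Bool.false_eq_true, if_false, Bool.not_false, Bool.true_and, aScan]
        by_cases hin : PySem.Str.isIn t name
        · rw [if_pos hin, if_pos hin, bScan_true, PySem.Dict.contains_eq_isSome_get?]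
        · rw [if_neg hin, if_neg hin, ← ih, PySem.Dict.contains_eq_isSome_get?]

theorem dict_mk_items {κ ν : Type} [BEq κ] (d : PySem.Dict κ ν) : PySem.Dict.mk d.items = d :=
  PySem.Dict.ext rfl

-- ===== VERDICT (by name: the statement is the Claim_ definition above) =====
theorem get_station_code_spec : Claim_equal_get_station_code := by
  intro user_station stations _
  unfold Spec_get_station_code get_station_code get_station_code_alt
  rw [← scan_main, dict_mk_items]
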